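-- pv_equiv track=rewrite | github.com/ysh91461778/server | routes/api_basic.py | _build_latest_status_by_sid
-- ===== SOURCE A (Python) =====
-- def _build_latest_status_by_sid(progress: dict) -> dict:
--     """
--     progress: {date: {sid: {mid: state}}}
--     return: {sid: {mid: state}} 최신 상태
--     """
--     out = {}
--     if not isinstance(progress, dict):
--         return out
--
--     for d in sorted(progress.keys()):
--         day = progress.get(d) or {}
--         if not isinstance(day, dict):
--             continue
--         for sid, mids in day.items():
--             if not isinstance(mids, dict):
--                 continue
--             sm = out.setdefault(str(sid), {})
--             for mid, st in mids.items():
--                 sm[str(mid)] = st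
--     return out
-- ===== SOURCE B (Python) =====
-- def _build_latest_status_by_sid(progress: dict) -> dict:
--     """
--     progress: {date: {sid: {mid: state}}}
--     return: {sid: {mid: state}} latest state per sid
--
--     Alternative strategy: flatten the chronology into one event stream
--     (sid, mids) in sorted-date order, collect the sids in first-appearance
--     order, then group the stream by sid: each sid's row is produced in one
--     shot by merging exactly its own fragments of the stream.
--     """
--     if not isinstance(progress, dict):
--         return {}
--     days = [day for d in sorted(progress.keys())
--             for day in [progress.get(d) or {}] if isinstance(day, dict)]
--     events = [(str(sid), mids) for day in days for sid, mids in day.items()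
--               if isinstance(mids, dict)]
--     sids = []
--     for sid, _ in events:
--         if sid not in sids:
--             sids.append(sid)
--     return {sid: {str(m): st for s, ms in events if s == sid
--                   for m, st in ms.items()}
--             for sid in sids}
-- ===== Notes on version B (the rewrite author's own statement) =====
-- stated objective: alternative
-- what changed: A replays the sorted days mutating a nested output dict cell by cell (setdefault + in-place row updates); B instead flattens the chronology into one (sid, mids) event stream, collects the sids in first-appearance order, and then groups the stream by sid, building each sid's row independently in one shot from exactly its own fragments.
import Mathlib
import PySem

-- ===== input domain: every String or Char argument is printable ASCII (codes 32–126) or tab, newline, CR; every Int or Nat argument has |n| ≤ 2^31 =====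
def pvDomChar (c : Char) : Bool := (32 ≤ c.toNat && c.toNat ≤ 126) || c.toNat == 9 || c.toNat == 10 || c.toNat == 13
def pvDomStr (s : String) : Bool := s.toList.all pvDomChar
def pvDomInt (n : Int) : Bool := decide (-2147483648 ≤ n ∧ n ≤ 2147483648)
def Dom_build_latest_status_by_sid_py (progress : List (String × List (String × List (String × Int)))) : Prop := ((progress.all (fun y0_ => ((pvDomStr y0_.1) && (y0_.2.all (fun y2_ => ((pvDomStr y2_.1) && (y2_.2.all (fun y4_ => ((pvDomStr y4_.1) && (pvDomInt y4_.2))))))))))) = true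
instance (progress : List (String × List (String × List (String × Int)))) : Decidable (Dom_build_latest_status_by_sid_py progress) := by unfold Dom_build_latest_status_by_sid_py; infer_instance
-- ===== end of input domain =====

-- B replaces A's replay that mutates a nested output dict cell by cell with an event-stream
-- grouping: flatten the sorted days into one (sid, mids) stream, list the sids in
-- first-appearance order, and build each sid's row in one shot from its own fragments;
-- objective: alternative (same result, genuinely different decomposition).

-- ===== PORT A =====
-- Literal port of _build_latest_status_by_sid.  At this type the input IS a dict, so
-- `isinstance(progress, dict)` / `isinstance(day, dict)` / `isinstance(mids, dict)` are
-- always true and `str(sid)` / `str(mid)` are the identity on the String keys.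
-- `sm = out.setdefault(str(sid), {})` followed by in-place `sm[str(mid)] = st` updates is
-- ported as one overwrite of out at sid with the fold of inserts started from out's old row
-- (Dict.insert keeps the position of an existing key and appends a new one, exactly Python).
def build_latest_status_by_sid_py (progress : List (String × List (String × List (String × Int)))) : List (String × List (String × Int)) :=
  let p : PySem.Dict String (List (String × List (String × Int))) := PySem.Dict.ofList progress
  let out : PySem.Dict String (PySem.Dict String Int) :=
    (PySem.List.sorted p.keys (fun x => x) false).foldl (fun out d =>
      let day := (p.get? d).getD []          -- day = progress.get(d) or {}
      day.foldl (fun out pr =>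
        out.insert pr.1 (pr.2.foldl (fun sm q => sm.insert q.1 q.2) (out.getD pr.1 PySem.Dict.empty))) out)
      PySem.Dict.empty
  out.items.map (fun kv => (kv.1, kv.2.items))

-- ===== PORT B =====
-- Literal port of Source B: flatten the sorted-day snapshots into the event stream `events`,
-- collect `sids` in first-appearance order, then the final dict comprehension groups the
-- stream by sid and merges each sid's own fragments into its row.
def build_latest_status_by_sid_py_alt (progress : List (String × List (String × List (String × Int)))) : List (String × List (String × Int)) :=
  let p : PySem.Dict String (List (String × List (String × Int))) := PySem.Dict.ofList progress
  let days : List (List (String × List (String × Int))) :=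
    (PySem.List.sorted p.keys (fun x => x) false).map (fun d => (p.get? d).getD [])
  let events : List (String × List (String × Int)) := days.flatMap (fun day => day)
  let sids : List String :=
    events.foldl (fun acc e => if acc.contains e.1 then acc else acc ++ [e.1]) []
  sids.map (fun sid =>
    (sid, (((events.filter (fun e => e.1 == sid)).flatMap (fun e => e.2)).foldl
             (fun sm q => sm.insert q.1 q.2)
             (PySem.Dict.empty : PySem.Dict String Int)).items))

-- ===== PRECONDITION & SPEC =====
def Spec_build_latest_status_by_sid_py (progress : List (String × List (String × List (String × Int)))) (out : List (String × List (String × Int))) : Prop := out = build_latest_status_by_sid_py_alt progress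
instance (progress : List (String × List (String × List (String × Int)))) (out : List (String × List (String × Int))) : Decidable (Spec_build_latest_status_by_sid_py progress out) := by unfold Spec_build_latest_status_by_sid_py; infer_instance

-- ===== CLAIM (what is proved, stated in full; the proofs are below) =====
def Claim_equal_build_latest_status_by_sid_py : Prop := ∀ (progress : List (String × List (String × List (String × Int)))), Dom_build_latest_status_by_sid_py progress → Spec_build_latest_status_by_sid_py progress (build_latest_status_by_sid_py progress)

-- ===== LEMMAS AND PROOFS =====

-- B's row for key k: merge the fragments of exactly k's events, in stream order
def pvRow (k : String) (es : List (String × List (String × Int))) : PySem.Dict String Int :=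
  ((es.filter (fun e => e.1 == k)).flatMap (fun e => e.2)).foldl
    (fun sm q => sm.insert q.1 q.2) PySem.Dict.empty

-- B's sid list: the event keys in first-appearance order
def pvKeys (es : List (String × List (String × Int))) : List String :=
  es.foldl (fun acc e => if acc.contains e.1 then acc else acc ++ [e.1]) []

theorem pvRow_append (k : String) (es : List (String × List (String × Int))) (e : String × List (String × Int)) :
    pvRow k (es ++ [e]) = if e.1 = k then e.2.foldl (fun sm q => sm.insert q.1 q.2) (pvRow k es) else pvRow k es := by
  by_cases h : e.1 = k <;>
    simp [pvRow, List.filter_append, List.flatMap_append, List.foldl_append, h]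

theorem pvKeys_mono (es : List (String × List (String × Int))) (acc : List String) (k : String)
    (h : k ∈ acc) : k ∈ es.foldl (fun acc e => if acc.contains e.1 then acc else acc ++ [e.1]) acc := by
  induction es generalizing acc with
  | nil => exact h
  | cons e t ih =>
      simp only [List.foldl_cons]
      split_ifs with hc
      · exact ih acc h
      · exact ih _ (List.mem_append_left _ h)

theorem pvKeys_mem (es : List (String × List (String × Int))) (acc : List String)
    (e : String × List (String × Int)) (h : e ∈ es) :
    e.1 ∈ es.foldl (fun acc e => if acc.contains e.1 then acc else acc ++ [e.1]) acc := by
  induction es generalizing acc with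
  | nil => cases h
  | cons a t ih =>
      simp only [List.foldl_cons]
      rcases List.mem_cons.mp h with rfl | ht
      · split_ifs with hc
        · exact pvKeys_mono t acc e.1 (by simpa using hc)
        · exact pvKeys_mono t _ e.1 (by simp)
      · exact ih _ ht

theorem pvRow_empty_of_not_mem (k : String) (es : List (String × List (String × Int)))
    (h : k ∉ pvKeys es) : pvRow k es = PySem.Dict.empty := by
  have hf : es.filter (fun e => e.1 == k) = [] := by
    refine List.filter_eq_nil_iff.mpr (fun e he => ?_)
    simp only [beq_iff_eq]
    intro hk
    exact h (hk ▸ pvKeys_mem es [] e he)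
  simp [pvRow, hf]

theorem pvFindKey (l : List String) (k : String) :
    l.find? (fun s => s == k) = if k ∈ l then some k else none := by
  induction l with
  | nil => simp
  | cons s t ih =>
      by_cases h : s = k
      · subst h; simp
      · simp [h, Ne.symm h, ih]

-- A's whole accumulation over the event stream, characterised in B's grouped form
theorem pvAfold_eq (es : List (String × List (String × Int))) :
    es.foldl (fun out pr =>
        out.insert pr.1 (pr.2.foldl (fun sm q => sm.insert q.1 q.2) (out.getD pr.1 PySem.Dict.empty)))
      PySem.Dict.empty
      = PySem.Dict.mk ((pvKeys es).map (fun sid => (sid, pvRow sid es))) := by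
  induction es using List.reverseRecOn with
  | nil => rfl
  | append_singleton es e ih =>
      rw [List.foldl_append, List.foldl_cons, List.foldl_nil, ih]
      have hkeys : pvKeys (es ++ [e])
          = if (pvKeys es).contains e.1 then pvKeys es else pvKeys es ++ [e.1] := by
        simp [pvKeys, List.foldl_append]
      have hget : (PySem.Dict.mk ((pvKeys es).map (fun sid => (sid, pvRow sid es)))).get? e.1
          = if e.1 ∈ pvKeys es then some (pvRow e.1 es) else none := by
        by_cases hm' : e.1 ∈ pvKeys es <;> simp [PySem.Dict.get?, Function.comp_def, pvFindKey, hm']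
      by_cases hm : e.1 ∈ pvKeys es
      · have hc : (PySem.Dict.mk ((pvKeys es).map (fun sid => (sid, pvRow sid es)))).contains e.1 = true := by
          rw [PySem.Dict.contains_eq_isSome_get?, hget]; simp [hm]
        have hgd : (PySem.Dict.mk ((pvKeys es).map (fun sid => (sid, pvRow sid es)))).getD e.1 PySem.Dict.empty
            = pvRow e.1 es := by
          rw [PySem.Dict.getD_eq_get?_getD, hget]; simp [hm]
        apply PySem.Dict.ext
        rw [PySem.Dict.items_insert_of_contains _ _ hc, hgd]
        show ((pvKeys es).map (fun sid => (sid, pvRow sid es))).map _ = _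
        rw [hkeys, if_pos (by simpa using hm), List.map_map]
        refine List.map_congr_left (fun sid _ => ?_)
        by_cases hs : sid = e.1
        · subst hs; simp [pvRow_append]
        · have hs' : e.1 ≠ sid := fun h => hs h.symm
          simp [hs, hs', pvRow_append]
      · have hc : (PySem.Dict.mk ((pvKeys es).map (fun sid => (sid, pvRow sid es)))).contains e.1 = false := by
          rw [PySem.Dict.contains_eq_isSome_get?, hget]; simp [hm]
        have hgd : (PySem.Dict.mk ((pvKeys es).map (fun sid => (sid, pvRow sid es)))).getD e.1 PySem.Dict.empty
            = PySem.Dict.empty := PySem.Dict.getD_of_not_contains _ _ hc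
        apply PySem.Dict.ext
        rw [PySem.Dict.items_insert_of_not_contains _ _ hc, hgd]
        rw [hkeys, if_neg (by simpa using hm), List.map_append]
        congr 1
        · refine List.map_congr_left (fun sid hsid => ?_)
          have hs : e.1 ≠ sid := fun h => hm (h ▸ hsid)
          simp [pvRow_append, hs]
        · simp [pvRow_append, pvRow_empty_of_not_mem e.1 es hm]

-- the whole pipeline on the list of day snapshots: A's nested replay = B's grouped output
theorem pvAssemble (days : List (List (String × List (String × Int)))) :
    ((days.foldl (fun out day => day.foldl (fun out pr =>
          out.insert pr.1 (pr.2.foldl (fun sm q => sm.insert q.1 q.2) (out.getD pr.1 PySem.Dict.empty))) out)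
        PySem.Dict.empty).items.map (fun kv => (kv.1, kv.2.items)))
      = (((days.flatMap (fun day => day)).foldl (fun acc e => if acc.contains e.1 then acc else acc ++ [e.1]) []).map
          (fun sid => (sid, ((((days.flatMap (fun day => day)).filter (fun e => e.1 == sid)).flatMap (fun e => e.2)).foldl
              (fun sm q => sm.insert q.1 q.2) (PySem.Dict.empty : PySem.Dict String Int)).items))) := by
  have h1 : days.flatMap (fun day => day) = days.flatten := by simp
  have h2 : days.foldl (fun out day => day.foldl (fun out pr =>
        out.insert pr.1 (pr.2.foldl (fun sm q => sm.insert q.1 q.2) (out.getD pr.1 PySem.Dict.empty))) out)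
      PySem.Dict.empty
      = days.flatten.foldl (fun out pr =>
          out.insert pr.1 (pr.2.foldl (fun sm q => sm.insert q.1 q.2) (out.getD pr.1 PySem.Dict.empty)))
        PySem.Dict.empty := by rw [List.foldl_flatten]
  rw [h1, h2, pvAfold_eq]
  simp only [List.map_map]
  rfl

-- both ports reduce to pvAssemble applied to the same sorted day snapshots
theorem pvPorts_eq (progress : List (String × List (String × List (String × Int)))) :
    build_latest_status_by_sid_py progress = build_latest_status_by_sid_py_alt progress := by
  simp only [build_latest_status_by_sid_py, build_latest_status_by_sid_py_alt]
  have hmap : (PySem.List.sorted (PySem.Dict.ofList progress).keys (fun x => x) false).foldl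
        (fun out d => (((PySem.Dict.ofList progress).get? d).getD []).foldl (fun out pr =>
          out.insert pr.1 (pr.2.foldl (fun sm q => sm.insert q.1 q.2) (out.getD pr.1 PySem.Dict.empty))) out)
        PySem.Dict.empty
      = ((PySem.List.sorted (PySem.Dict.ofList progress).keys (fun x => x) false).map
          (fun d => (((PySem.Dict.ofList progress).get? d).getD []))).foldl
        (fun out day => day.foldl (fun out pr =>
          out.insert pr.1 (pr.2.foldl (fun sm q => sm.insert q.1 q.2) (out.getD pr.1 PySem.Dict.empty))) out)
        PySem.Dict.empty := by
    rw [List.foldl_map]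
  rw [hmap]
  exact pvAssemble _

-- ===== VERDICT (by name: the statement is the Claim_ definition above) =====
theorem build_latest_status_by_sid_py_spec : Claim_equal_build_latest_status_by_sid_py := by
  intro progress _
  show build_latest_status_by_sid_py progress = build_latest_status_by_sid_py_alt progress
  exact pvPorts_eq progress
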